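-- pv_equiv track=rewrite | github.com/FaultMaven/FaultMaven-Mono | faultmaven/core/planning/strategy_planner.py | _estimate_personnel_needs
-- ===== SOURCE A (Python) =====
-- from typing import Dict, List, Any, Optional
--
-- def _estimate_personnel_needs(adapted_strategy: Dict[str, Any], context: Dict[str, Any]) -> List[str]:
--     """Estimate personnel requirements"""
--     personnel = ["Primary troubleshooter"]
--
--     methodology = adapted_strategy["methodology"]
--
--     # Check for domain expertise needs
--     if any("database" in step.lower() for step in methodology):
--         personnel.append("Database administrator (if available)")
--
--     if any("network" in step.lower() for step in methodology):
--         personnel.append("Network specialist (if available)")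
--
--     if any("security" in step.lower() for step in methodology):
--         personnel.append("Security expert (if available)")
--
--     # Check for coordination needs
--     if "coordinate" in str(methodology).lower():
--         personnel.append("Team coordinator")
--
--     return personnel
-- ===== SOURCE B (Python) =====
-- def _estimate_personnel_needs(adapted_strategy, context):
--     """Estimate personnel requirements (single pass over methodology)."""
--     need_db = need_net = need_sec = need_coord = False
--     for step in adapted_strategy["methodology"]:
--         low = step.lower()
--         need_db = need_db or "database" in low
--         need_net = need_net or "network" in low
--         need_sec = need_sec or "security" in low
--         # per-step test equals A's test on str(methodology): repr separators/escapes
--         # cannot form or break an occurrence of "coordinate"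
--         need_coord = need_coord or "coordinate" in low
--     personnel = ["Primary troubleshooter"]
--     if need_db:
--         personnel.append("Database administrator (if available)")
--     if need_net:
--         personnel.append("Network specialist (if available)")
--     if need_sec:
--         personnel.append("Security expert (if available)")
--     if need_coord:
--         personnel.append("Team coordinator")
--     return personnel
-- ===== Notes on version B (the rewrite author's own statement) =====
-- stated objective: alternative
-- what changed: A's four separate scans (three any(...) generator passes over methodology plus a substring test on str(methodology)) are replaced by one loop that lowercases each step once and accumulates four boolean flags, with the coordination test done per step (proved equal to A's test on str(methodology): repr quoting/escaping and the ', ' separators can neither create nor destroy an occurrence of 'coordinate').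
import Mathlib
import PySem

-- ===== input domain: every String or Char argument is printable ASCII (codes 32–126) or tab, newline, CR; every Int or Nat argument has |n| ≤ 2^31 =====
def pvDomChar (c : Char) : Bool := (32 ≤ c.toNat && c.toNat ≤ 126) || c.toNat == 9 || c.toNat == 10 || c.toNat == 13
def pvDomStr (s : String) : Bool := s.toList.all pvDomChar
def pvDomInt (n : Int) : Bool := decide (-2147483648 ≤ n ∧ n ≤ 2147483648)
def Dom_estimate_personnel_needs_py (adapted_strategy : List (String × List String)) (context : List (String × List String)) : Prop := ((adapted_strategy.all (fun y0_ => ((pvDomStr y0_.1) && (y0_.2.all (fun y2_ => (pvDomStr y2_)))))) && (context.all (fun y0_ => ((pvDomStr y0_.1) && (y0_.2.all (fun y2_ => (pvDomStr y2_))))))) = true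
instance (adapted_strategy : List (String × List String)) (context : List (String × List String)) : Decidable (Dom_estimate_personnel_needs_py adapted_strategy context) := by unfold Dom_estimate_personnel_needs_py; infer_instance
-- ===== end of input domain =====

-- B replaces A's four separate scans of the methodology list (three any(...) generator
-- passes plus a substring test on str(methodology)) by one loop that lowercases each step
-- once and accumulates four boolean flags, testing "coordinate" per step; objective: alternative.

-- ===== PORT A =====
-- Hand port of Python's str(list_of_str) (repr of each element, joined by ", ", in "[...]");
-- exact on the printable-ASCII + tab/newline/CR domain (no other chars need \xNN escapes there).
def pyQuoteOf (s : List Char) : Char := if '\'' ∈ s ∧ '"' ∉ s then '"' else '\''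
def pyEscChar (q c : Char) : List Char :=
  if c = '\\' then ['\\', '\\']
  else if c = q then ['\\', q]
  else if c = '\t' then ['\\', 't']
  else if c = '\n' then ['\\', 'n']
  else if c = '\r' then ['\\', 'r']
  else [c]
def pyReprStr (s : String) : List Char :=
  pyQuoteOf s.toList :: s.toList.flatMap (pyEscChar (pyQuoteOf s.toList)) ++ [pyQuoteOf s.toList]
def pyStrInner : List String → List Char
  | [] => []
  | [s] => pyReprStr s
  | s :: rest => pyReprStr s ++ ',' :: ' ' :: pyStrInner rest
def pyStrOfList (m : List String) : List Char := '[' :: pyStrInner m ++ [']']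

def estimate_personnel_needs_py (adapted_strategy : List (String × List String)) (context : List (String × List String)) : List String :=
  match (PySem.Dict.mk adapted_strategy).get? "methodology" with
  | none => []  -- KeyError in Python; excluded by Pre_
  | some methodology =>
    let personnel := ["Primary troubleshooter"]
    let personnel := if methodology.any (fun step => PySem.Str.isIn "database" (PySem.Str.lower step)) then personnel ++ ["Database administrator (if available)"] else personnel
    let personnel := if methodology.any (fun step => PySem.Str.isIn "network" (PySem.Str.lower step)) then personnel ++ ["Network specialist (if available)"] else personnel
    let personnel := if methodology.any (fun step => PySem.Str.isIn "security" (PySem.Str.lower step)) then personnel ++ ["Security expert (if available)"] else personnel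
    let personnel := if PySem.Chars.isIn "coordinate".toList (PySem.Chars.lower (pyStrOfList methodology)) then personnel ++ ["Team coordinator"] else personnel
    personnel

-- ===== PORT B =====
def estimate_personnel_needs_py_alt (adapted_strategy : List (String × List String)) (context : List (String × List String)) : List String :=
  match (PySem.Dict.mk adapted_strategy).get? "methodology" with
  | none => []  -- KeyError in Python; excluded by Pre_
  | some methodology =>
    let flags := methodology.foldl (fun (f : Bool × Bool × Bool × Bool) step =>
      let low := PySem.Str.lower step
      (f.1 || PySem.Str.isIn "database" low,
       f.2.1 || PySem.Str.isIn "network" low,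
       f.2.2.1 || PySem.Str.isIn "security" low,
       f.2.2.2 || PySem.Str.isIn "coordinate" low)) (false, false, false, false)
    ["Primary troubleshooter"]
      ++ (if flags.1 then ["Database administrator (if available)"] else [])
      ++ (if flags.2.1 then ["Network specialist (if available)"] else [])
      ++ (if flags.2.2.1 then ["Security expert (if available)"] else [])
      ++ (if flags.2.2.2 then ["Team coordinator"] else [])

-- ===== PRECONDITION & SPEC =====
-- Pre_ excludes exactly the dicts without a "methodology" key, on which Python A raises KeyError.
def Pre_estimate_personnel_needs_py (adapted_strategy : List (String × List String)) (context : List (String × List String)) : Prop :=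
  ((PySem.Dict.mk adapted_strategy).get? "methodology").isSome = true
instance (adapted_strategy : List (String × List String)) (context : List (String × List String)) : Decidable (Pre_estimate_personnel_needs_py adapted_strategy context) := by unfold Pre_estimate_personnel_needs_py; infer_instance
def pvWitness_estimate_personnel_needs_py : (List (String × List String)) × (List (String × List String)) :=
  ([("methodology", ["Check database logs", "coordinate with the network team"])], [])

def Spec_estimate_personnel_needs_py (adapted_strategy : List (String × List String)) (context : List (String × List String)) (out : List String) : Prop := out = estimate_personnel_needs_py_alt adapted_strategy context
instance (adapted_strategy : List (String × List String)) (context : List (String × List String)) (out : List String) : Decidable (Spec_estimate_personnel_needs_py adapted_strategy context out) := by unfold Spec_estimate_personnel_needs_py; infer_instance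

-- ===== CLAIM (what is proved, stated in full; the proofs are below) =====
def Claim_equal_estimate_personnel_needs_py : Prop := ∀ (adapted_strategy : List (String × List String)) (context : List (String × List String)), Dom_estimate_personnel_needs_py adapted_strategy context → Pre_estimate_personnel_needs_py adapted_strategy context → Spec_estimate_personnel_needs_py adapted_strategy context (estimate_personnel_needs_py adapted_strategy context)

-- ===== LEMMAS AND PROOFS =====

-- abbreviation used only by the proofs
def coordP : List Char := ['c', 'o', 'o', 'r', 'd', 'i', 'n', 'a', 't', 'e']

lemma coordP_toList : "coordinate".toList = coordP := by decide

-- shape of a single escape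
lemma pyEscChar_shape (q c : Char) :
    pyEscChar q c = [c] ∨ ∃ x, pyEscChar q c = ['\\', x] ∧ (x = '\\' ∨ x = q ∨ x = 't' ∨ x = 'n' ∨ x = 'r') := by
  unfold pyEscChar; split_ifs with h1 h2 h3 h4 h5
  · exact Or.inr ⟨'\\', rfl, Or.inl rfl⟩
  · exact Or.inr ⟨q, rfl, Or.inr (Or.inl rfl)⟩
  · exact Or.inr ⟨'t', rfl, by simp⟩
  · exact Or.inr ⟨'n', rfl, by simp⟩
  · exact Or.inr ⟨'r', rfl, by simp⟩
  · exact Or.inl rfl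

lemma pyQuoteOf_cases (s : List Char) : pyQuoteOf s = '\'' ∨ pyQuoteOf s = '"' := by
  unfold pyQuoteOf; split_ifs <;> simp

-- lowerChar facts
lemma lower_eq_map (l : List Char) : PySem.Chars.lower l = l.map PySem.Chars.lowerChar := by
  simp [PySem.Chars.lower]

lemma lowerChar_fix (c : Char) (h : PySem.Chars.isupper c = false) : PySem.Chars.lowerChar c = c := by
  simp [PySem.Chars.lowerChar, h]

lemma isupper_iff (c : Char) : PySem.Chars.isupper c = true ↔ 65 ≤ c.toNat ∧ c.toNat ≤ 90 := by
  unfold PySem.Chars.isupper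
  rw [Bool.and_eq_true, decide_eq_true_iff, decide_eq_true_iff, Char.le_def, Char.le_def,
    UInt32.le_iff_toNat_le, UInt32.le_iff_toNat_le]
  exact Iff.rfl

lemma pyEscChar_of_plain (q c : Char) (h1 : c ≠ '\\') (h2 : c ≠ q) (h3 : c ≠ '\t') (h4 : c ≠ '\n') (h5 : c ≠ '\r') :
    pyEscChar q c = [c] := by simp [pyEscChar, h1, h2, h3, h4, h5]

lemma toNat_charOfNat (n : Nat) (h : n < 55000) : (Char.ofNat n).toNat = n := by
  simp [Char.ofNat, Char.ofNatAux, Nat.isValidChar]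
  rw [dif_pos (Or.inl (by omega))]
  simp [Char.toNat, UInt32.toNat_ofNatLT]

lemma toNat_lowerChar_upper (c : Char) (hu : PySem.Chars.isupper c = true) :
    (PySem.Chars.lowerChar c).toNat = c.toNat + 32 := by
  have h := (isupper_iff c).mp hu
  simp only [PySem.Chars.lowerChar, hu, if_true]
  exact toNat_charOfNat _ (by omega)

-- lowering commutes with a single escape (quote is ' or ")
lemma map_lower_pyEscChar (q c : Char) (hq : q = '\'' ∨ q = '"') :
    (pyEscChar q c).map PySem.Chars.lowerChar = pyEscChar q (PySem.Chars.lowerChar c) := by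
  by_cases hu : PySem.Chars.isupper c
  · have h := (isupper_iff c).mp hu
    have hne : ∀ x : Char, x.toNat ≤ 64 ∨ 91 ≤ x.toNat → c ≠ x := by
      intro x hx hEq; rw [hEq] at h; omega
    have hc : pyEscChar q c = [c] := by
      refine pyEscChar_of_plain q c (hne _ (by decide)) (hne _ ?_) (hne _ (by decide)) (hne _ (by decide)) (hne _ (by decide))
      rcases hq with rfl | rfl <;> decide
    have hd := toNat_lowerChar_upper c hu
    have hne' : ∀ x : Char, x.toNat ≤ 96 ∨ 123 ≤ x.toNat → PySem.Chars.lowerChar c ≠ x := by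
      intro x hx hEq; rw [hEq] at hd; omega
    have hld : pyEscChar q (PySem.Chars.lowerChar c) = [PySem.Chars.lowerChar c] := by
      refine pyEscChar_of_plain _ _ (hne' _ (by decide)) (hne' _ ?_) (hne' _ (by decide)) (hne' _ (by decide)) (hne' _ (by decide))
      rcases hq with rfl | rfl <;> decide
    rw [hc, hld]; rfl
  · rw [Bool.not_eq_true] at hu
    rw [lowerChar_fix c hu]
    unfold pyEscChar
    split_ifs <;> first | decide | (rcases hq with rfl | rfl <;> decide) | simp [lowerChar_fix c hu]

lemma map_lower_flatMap (q : Char) (hq : q = '\'' ∨ q = '"') (s : List Char) :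
    (s.flatMap (pyEscChar q)).map PySem.Chars.lowerChar = (s.map PySem.Chars.lowerChar).flatMap (pyEscChar q) := by
  induction s with
  | nil => simp
  | cons c t ih => simp [List.flatMap_cons, ih, map_lower_pyEscChar q c hq]

-- the lowered interior of str(list)
def pyStrInnerLow : List String → List Char
  | [] => []
  | [s] => pyQuoteOf s.toList :: (s.toList.map PySem.Chars.lowerChar).flatMap (pyEscChar (pyQuoteOf s.toList)) ++ [pyQuoteOf s.toList]
  | s :: rest => (pyQuoteOf s.toList :: (s.toList.map PySem.Chars.lowerChar).flatMap (pyEscChar (pyQuoteOf s.toList)) ++ [pyQuoteOf s.toList]) ++ ',' :: ' ' :: pyStrInnerLow rest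

lemma lowerChar_quote (q : Char) (hq : q = '\'' ∨ q = '"') : PySem.Chars.lowerChar q = q := by
  rcases hq with rfl | rfl <;> decide

lemma map_lower_pyStrInner (m : List String) : (pyStrInner m).map PySem.Chars.lowerChar = pyStrInnerLow m := by
  induction m with
  | nil => simp [pyStrInner, pyStrInnerLow]
  | cons s rest ih =>
    cases rest with
    | nil =>
      simp [pyStrInner, pyStrInnerLow, pyReprStr,
        map_lower_flatMap _ (pyQuoteOf_cases s.toList),
        lowerChar_quote _ (pyQuoteOf_cases s.toList)]
    | cons b t =>
      simp [pyStrInner, pyStrInnerLow, pyReprStr, ih,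
        map_lower_flatMap _ (pyQuoteOf_cases s.toList),
        lowerChar_quote _ (pyQuoteOf_cases s.toList)]
      decide

-- a pattern starting with a character other than x is no prefix of x :: l
lemma coordP_not_prefix (x : Char) (hx : x ≠ 'c') (l : List Char) : ¬ coordP <+: x :: l := by
  intro h
  obtain ⟨r, hr⟩ := h
  simp only [coordP, List.cons_append, List.cons.injEq] at hr
  exact hx hr.1.symm

lemma coordP_infix_cons_elim (x : Char) (l : List Char) (h : coordP <:+: x :: l) (hx : x ≠ 'c') :
    coordP <:+: l :=
  (List.infix_cons_iff.mp h).resolve_left (coordP_not_prefix x hx l)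

-- prefix through an escaped body
lemma prefix_of_prefix_flatMap (q : Char) :
    ∀ (P s : List Char), '\\' ∉ P → P <+: s.flatMap (pyEscChar q) → P <+: s := by
  intro P s
  induction s generalizing P with
  | nil => simp
  | cons c t ih =>
    intro hbs hp
    rw [List.flatMap_cons] at hp
    rcases pyEscChar_shape q c with he | ⟨x, he, _⟩
    · rw [he, List.singleton_append] at hp
      cases P with
      | nil => exact List.nil_prefix
      | cons p P' =>
        rw [List.cons_prefix_cons] at hp
        obtain ⟨rfl, hp'⟩ := hp
        exact List.cons_prefix_cons.mpr ⟨rfl, ih P' (fun hm => hbs (List.mem_cons_of_mem _ hm)) hp'⟩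
    · rw [he] at hp
      cases P with
      | nil => exact List.nil_prefix
      | cons p P' =>
        rw [List.cons_append, List.cons_prefix_cons] at hp
        exact absurd (by rw [hp.1]; exact List.mem_cons_self) hbs

-- infix through an escaped body (for the concrete pattern)
lemma infix_of_infix_flatMap (q : Char) (hq : q = '\'' ∨ q = '"') :
    ∀ s : List Char, coordP <:+: s.flatMap (pyEscChar q) → coordP <:+: s := by
  intro s
  induction s with
  | nil =>
    intro h
    exact absurd (List.eq_nil_of_infix_nil h) (by decide)
  | cons c t ih =>
    intro h
    rw [List.flatMap_cons] at h
    rcases pyEscChar_shape q c with he | ⟨x, he, hx⟩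
    · rw [he, List.singleton_append] at h
      rcases List.infix_cons_iff.mp h with hpre | hinf
      · have : coordP <+: c :: t := by
          refine prefix_of_prefix_flatMap q coordP (c :: t) (by decide) ?_
          rw [List.flatMap_cons, he, List.singleton_append]; exact hpre
        exact this.isInfix
      · exact List.infix_cons_iff.mpr (Or.inr (ih hinf))
    · rw [he] at h
      simp only [List.cons_append, List.nil_append] at h
      have h1 := coordP_infix_cons_elim _ _ h (by decide)
      have hxc : x ≠ 'c' := by
        rcases hx with rfl | rfl | rfl | rfl | rfl
        · decide
        · rcases hq with rfl | rfl <;> decide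
        all_goals decide
      have h2 := coordP_infix_cons_elim _ _ h1 hxc
      exact List.infix_cons_iff.mpr (Or.inr (ih h2))

lemma flatMap_esc_coordP (q : Char) (hq : q = '\'' ∨ q = '"') :
    coordP.flatMap (pyEscChar q) = coordP := by
  rcases hq with rfl | rfl <;> decide

lemma infix_flatMap_of_infix (q : Char) (hq : q = '\'' ∨ q = '"') (s : List Char)
    (h : coordP <:+: s) : coordP <:+: s.flatMap (pyEscChar q) := by
  obtain ⟨u, v, rfl⟩ := h
  refine ⟨u.flatMap (pyEscChar q), v.flatMap (pyEscChar q), ?_⟩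
  simp [List.flatMap_append, flatMap_esc_coordP q hq]

-- splitting an infix occurrence at a separator character not occurring in the pattern
lemma prefix_split (q : Char) : ∀ (P a b : List Char), q ∉ P → P <+: a ++ q :: b → P <+: a := by
  intro P a
  induction a generalizing P with
  | nil =>
    intro b hq hp
    cases P with
    | nil => exact List.nil_prefix
    | cons p P' =>
      rw [List.nil_append, List.cons_prefix_cons] at hp
      exact absurd (by rw [hp.1]; exact List.mem_cons_self) hq
  | cons x t ih =>
    intro b hq hp
    cases P with
    | nil => exact List.nil_prefix
    | cons p P' =>
      rw [List.cons_append, List.cons_prefix_cons] at hp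
      exact List.cons_prefix_cons.mpr ⟨hp.1, ih P' b (fun hm => hq (List.mem_cons_of_mem _ hm)) hp.2⟩

lemma infix_split (q : Char) (P : List Char) (hq : q ∉ P) :
    ∀ a b : List Char, (P <:+: a ++ q :: b ↔ P <:+: a ∨ P <:+: b) := by
  intro a
  induction a with
  | nil =>
    intro b
    rw [List.nil_append, List.infix_cons_iff]
    constructor
    · rintro (hpre | h)
      · cases P with
        | nil => exact Or.inl (List.nil_infix)
        | cons p P' =>
          rw [List.cons_prefix_cons] at hpre
          exact absurd (by rw [hpre.1]; exact List.mem_cons_self) hq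
      · exact Or.inr h
    · rintro (h | h)
      · rw [List.eq_nil_of_infix_nil h]; exact Or.inr List.nil_infix
      · exact Or.inr h
  | cons x t ih =>
    intro b
    rw [List.cons_append, List.infix_cons_iff]
    constructor
    · rintro (hpre | h)
      · exact Or.inl (prefix_split q P (x :: t) b hq hpre).isInfix
      · rcases (ih b).mp h with h1 | h1
        · exact Or.inl (List.infix_cons_iff.mpr (Or.inr h1))
        · exact Or.inr h1
    · rintro (h | h)
      · rcases List.infix_cons_iff.mp h with hpre | hinf
        · exact Or.inl (hpre.trans (List.prefix_append _ _))
        · exact Or.inr ((ih b).mpr (Or.inl hinf))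
      · exact Or.inr ((ih b).mpr (Or.inr h))

lemma coordP_not_quote (s : List Char) : pyQuoteOf s ∉ coordP := by
  rcases pyQuoteOf_cases s with h | h <;> rw [h] <;> decide

-- the interior characterisation
lemma infix_innerLow_iff : ∀ m : List String,
    (coordP <:+: pyStrInnerLow m ↔ ∃ s ∈ m, coordP <:+: s.toList.map PySem.Chars.lowerChar) := by
  intro m
  induction m with
  | nil =>
    simp only [pyStrInnerLow, List.not_mem_nil, false_and, exists_false, iff_false]
    exact fun h => absurd (List.eq_nil_of_infix_nil h) (by decide)
  | cons s rest ih =>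
    have hq := pyQuoteOf_cases s.toList
    have hbody : coordP <:+: (s.toList.map PySem.Chars.lowerChar).flatMap (pyEscChar (pyQuoteOf s.toList))
        ↔ coordP <:+: s.toList.map PySem.Chars.lowerChar :=
      ⟨infix_of_infix_flatMap _ hq _, infix_flatMap_of_infix _ hq _⟩
    cases rest with
    | nil =>
      simp only [pyStrInnerLow]
      constructor
      · intro h
        have h1 := coordP_infix_cons_elim _ _ h (by rcases hq with h' | h' <;> rw [h'] <;> decide)
        rcases (infix_split _ coordP (coordP_not_quote s.toList) _ []).mp h1 with h2 | h2
        · exact ⟨s, List.mem_singleton.mpr rfl, hbody.mp h2⟩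
        · exact absurd (List.eq_nil_of_infix_nil h2) (by decide)
      · rintro ⟨t, ht, hinf⟩
        rw [List.mem_singleton] at ht; subst ht
        have h2 := hbody.mpr hinf
        exact h2.trans ⟨[pyQuoteOf t.toList], [pyQuoteOf t.toList], by simp⟩
    | cons b t =>
      simp only [pyStrInnerLow, List.cons_append, List.append_assoc, List.nil_append]
      constructor
      · intro h
        have h1 := coordP_infix_cons_elim _ _ h (by rcases hq with h' | h' <;> rw [h'] <;> decide)
        rcases (infix_split _ coordP (coordP_not_quote s.toList) _ _).mp h1 with h2 | h2
        · exact ⟨s, List.mem_cons_self, hbody.mp h2⟩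
        · have h3 := coordP_infix_cons_elim _ _ h2 (by decide)
          have h4 := coordP_infix_cons_elim _ _ h3 (by decide)
          obtain ⟨u, hu, hinf⟩ := ih.mp h4
          exact ⟨u, List.mem_cons_of_mem _ hu, hinf⟩
      · rintro ⟨u, hu, hinf⟩
        rcases List.mem_cons.mp hu with rfl | hu'
        · have h2 := hbody.mpr hinf
          exact h2.trans ⟨[pyQuoteOf u.toList], pyQuoteOf u.toList :: ',' :: ' ' :: pyStrInnerLow (b :: t), by simp⟩
        · have h4 : coordP <:+: pyStrInnerLow (b :: t) := ih.mpr ⟨u, hu', hinf⟩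
          refine h4.trans ⟨pyQuoteOf s.toList :: (s.toList.map PySem.Chars.lowerChar).flatMap (pyEscChar (pyQuoteOf s.toList)) ++ [pyQuoteOf s.toList] ++ [',', ' '], [], by simp⟩

-- the coordinate test of A equals the per-step test of B
lemma coord_eq (m : List String) :
    PySem.Chars.isIn "coordinate".toList (PySem.Chars.lower (pyStrOfList m))
      = m.any (fun step => PySem.Str.isIn "coordinate" (PySem.Str.lower step)) := by
  rw [Bool.eq_iff_iff, PySem.Chars.isIn_iff_infix, List.any_eq_true]
  have hmap : PySem.Chars.lower (pyStrOfList m) = '[' :: pyStrInnerLow m ++ [']'] := by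
    rw [lower_eq_map, pyStrOfList]
    simp only [List.map_cons, List.map_append, List.map_nil, map_lower_pyStrInner,
      show PySem.Chars.lowerChar '[' = '[' from by decide,
      show PySem.Chars.lowerChar ']' = ']' from by decide]
  rw [hmap, coordP_toList]
  constructor
  · intro h
    have h1 := coordP_infix_cons_elim _ _ h (by decide)
    rcases (infix_split ']' coordP (by decide) (pyStrInnerLow m) []).mp h1 with h2 | h2
    · obtain ⟨s, hs, hinf⟩ := (infix_innerLow_iff m).mp h2
      refine ⟨s, hs, ?_⟩
      rw [PySem.Str.isIn_iff_infix, coordP_toList]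
      simpa [lower_eq_map] using hinf
    · exact absurd (List.eq_nil_of_infix_nil h2) (by decide)
  · rintro ⟨s, hs, h⟩
    rw [PySem.Str.isIn_iff_infix, coordP_toList] at h
    have hinf : coordP <:+: s.toList.map PySem.Chars.lowerChar := by
      simpa [lower_eq_map] using h
    have h2 := (infix_innerLow_iff m).mpr ⟨s, hs, hinf⟩
    exact h2.trans ⟨['['], [']'], by simp⟩

-- the flag fold of B computes the four any-scans of A
lemma flags_eq (m : List String) (init : Bool × Bool × Bool × Bool) :
    m.foldl (fun (f : Bool × Bool × Bool × Bool) step =>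
      let low := PySem.Str.lower step
      (f.1 || PySem.Str.isIn "database" low,
       f.2.1 || PySem.Str.isIn "network" low,
       f.2.2.1 || PySem.Str.isIn "security" low,
       f.2.2.2 || PySem.Str.isIn "coordinate" low)) init
    = (init.1 || m.any (fun s => PySem.Str.isIn "database" (PySem.Str.lower s)),
       init.2.1 || m.any (fun s => PySem.Str.isIn "network" (PySem.Str.lower s)),
       init.2.2.1 || m.any (fun s => PySem.Str.isIn "security" (PySem.Str.lower s)),
       init.2.2.2 || m.any (fun s => PySem.Str.isIn "coordinate" (PySem.Str.lower s))) := by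
  induction m generalizing init with
  | nil => simp
  | cons s t ih => rw [List.foldl_cons, ih]; simp [Bool.or_assoc]

-- ===== VERDICT (by name: the statement is the Claim_ definition above) =====
theorem estimate_personnel_needs_py_spec : Claim_equal_estimate_personnel_needs_py := by
  intro a c _ _
  unfold Spec_estimate_personnel_needs_py
  unfold estimate_personnel_needs_py estimate_personnel_needs_py_alt
  cases hm : (PySem.Dict.mk a).get? "methodology" with
  | none => rfl
  | some m =>
    simp only [flags_eq, coord_eq]
    cases m.any (fun s => PySem.Str.isIn "database" (PySem.Str.lower s)) <;>
      cases m.any (fun s => PySem.Str.isIn "network" (PySem.Str.lower s)) <;>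
        cases m.any (fun s => PySem.Str.isIn "security" (PySem.Str.lower s)) <;>
          cases m.any (fun s => PySem.Str.isIn "coordinate" (PySem.Str.lower s)) <;> rfl
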